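-- pv_equiv track=rewrite | github.com/0LukasV1/dopis | 15.py | color_brackets
-- ===== SOURCE A (Python) =====
-- def color_brackets(expression):
--     colors = ['red', 'green', 'blue', 'cyan', 'magenta', 'yellow', 'orange']
--     color_index = 0
--     colored_expression = ''
--     stack = []
--     for char in expression:
--         if char == '(':
--             stack.append(colors[color_index])
--             colored_expression += f'{{"{colors[color_index]}"}}{char}'
--             color_index = (color_index + 1) % len(colors)
--         elif char == ')':
--             if stack:
--                 colored_expression += f'{{"{stack.pop()}"}}{char}'
--             else:
--                 colored_expression += char
--         else:
--             colored_expression += char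
--     return colored_expression
-- ===== SOURCE B (Python) =====
-- def color_brackets(expression):
--     colors = ['red', 'green', 'blue', 'cyan', 'magenta', 'yellow', 'orange']
--     n = len(expression)
--
--     def pfx(k):
--         return '{"' + colors[k % 7] + '"}'
--
--     def seg(i, opens):
--         """Recursive descent: render one bracket-balanced segment starting at i.
--         Recursion depth = nesting depth; stops at the end of the string or at a
--         ')' not opened inside this segment. Returns (text, stop index, opens)."""
--         parts = []
--         while i < n:
--             ch = expression[i]
--             if ch == '(':
--                 k = opens
--                 inner, j, opens = seg(i + 1, opens + 1)
--                 if j < n:  # expression[j] is this '(' 's matching ')'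
--                     parts.append(pfx(k) + '(' + inner + pfx(k) + ')')
--                     i = j + 1
--                 else:      # unmatched '(' keeps its color
--                     parts.append(pfx(k) + '(' + inner)
--                     i = j
--             elif ch == ')':
--                 break      # not ours: the caller (or top level) decides
--             else:
--                 parts.append(ch)
--                 i += 1
--         return ''.join(parts), i, opens
--
--     out = []
--     i, opens = 0, 0
--     while i < n:
--         text, i, opens = seg(i, opens)
--         out.append(text)
--         if i < n:  # unmatched ')' at top level: bare
--             out.append(')')
--             i += 1
--     return ''.join(out)
-- ===== Notes on version B (the rewrite author's own statement) =====
-- stated objective: alternative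
-- what changed: A's single iterative pass with an explicit color stack is replaced by a recursive-descent parser: seg() renders one bracket-balanced segment, pairing each opening bracket with its closer through the recursion's call structure (no stack), while a small top-level loop emits unmatched closers bare.
import Mathlib
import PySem

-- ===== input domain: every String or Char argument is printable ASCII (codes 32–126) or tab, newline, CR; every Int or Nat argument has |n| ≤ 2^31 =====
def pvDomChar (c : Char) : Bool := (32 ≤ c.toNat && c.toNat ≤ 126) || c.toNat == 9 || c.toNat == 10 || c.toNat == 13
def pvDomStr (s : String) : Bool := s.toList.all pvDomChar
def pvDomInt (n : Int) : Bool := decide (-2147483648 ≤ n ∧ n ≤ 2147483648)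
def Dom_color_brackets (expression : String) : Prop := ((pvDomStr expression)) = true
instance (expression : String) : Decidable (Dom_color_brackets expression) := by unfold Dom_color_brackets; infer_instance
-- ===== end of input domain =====

-- B replaces A's iterative color-stack pass by a recursive-descent parser (matching via the
-- call structure, no stack); objective: alternative decomposition, return value proved equal.

-- ===== PORT A =====
def pvColors : List (List Char) :=
  ["red".toList, "green".toList, "blue".toList, "cyan".toList, "magenta".toList, "yellow".toList, "orange".toList]

-- f'{{"{col}"}}' : the literal prefix `{"col"}`
def pvPfx (col : List Char) : List Char := "{\"".toList ++ col ++ "\"}".toList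

-- A's loop; strings as char lists; the Python stack's end (push/pop side) is the list head;
-- color_index is carried as a Nat (it is always in 0..6, and (ci+1) % 7 is Python's update).
def pvGoA : List Char → Nat → List (List Char) → List Char → List Char
  | [], _, _, out => out
  | c :: cs, ci, stack, out =>
    if c = '(' then
      pvGoA cs ((ci + 1) % 7) (pvColors.getD ci [] :: stack) (out ++ pvPfx (pvColors.getD ci []) ++ [c])
    else if c = ')' then
      match stack with
      | top :: rest => pvGoA cs ci rest (out ++ pvPfx top ++ [c])
      | [] => pvGoA cs ci [] (out ++ [c])
    else
      pvGoA cs ci stack (out ++ [c])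

def color_brackets (expression : String) : String :=
  String.ofList (pvGoA expression.toList 0 [] [])

-- ===== PORT B =====
-- B's pfx(k) = '{"' + colors[k % 7] + '"}'
def pvPfxK (k : Nat) : List Char := "{\"".toList ++ pvColors.getD (k % 7) [] ++ "\"}".toList

-- B's seg(): recursive descent on the remaining characters; stops at the end or at a ')'
-- not opened inside the segment; returns (text, remaining suffix, opens count).  The fuel
-- argument only makes the recursion structural (the suffix shrinks); it is always ample.
def pvSeg : Nat → List Char → Nat → List Char × List Char × Nat
  | 0, cs, opens => ([], cs, opens)
  | f + 1, [], opens => ([], [], opens)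
  | f + 1, c :: rest, opens =>
    if c = '(' then
      let r := pvSeg f rest (opens + 1)
      match r.2.1 with
      | ')' :: rem' =>
        let t := pvSeg f rem' r.2.2
        (pvPfxK opens ++ ['('] ++ r.1 ++ pvPfxK opens ++ [')'] ++ t.1, t.2.1, t.2.2)
      | _ => (pvPfxK opens ++ ['('] ++ r.1, r.2.1, r.2.2)
    else if c = ')' then
      ([], c :: rest, opens)
    else
      let t := pvSeg f rest opens
      (c :: t.1, t.2.1, t.2.2)

-- B's top-level while loop: render a segment, then emit an unmatched ')' bare, repeat.
def pvTop : Nat → List Char → Nat → List Char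
  | 0, _, _ => []
  | f + 1, cs, opens =>
    let s := pvSeg cs.length cs opens
    match s.2.1 with
    | ')' :: rem' => s.1 ++ [')'] ++ pvTop f rem' s.2.2
    | _ => s.1

def color_brackets_alt (expression : String) : String :=
  String.ofList (pvTop (expression.toList.length + 1) expression.toList 0)

-- ===== PRECONDITION & SPEC =====
def Spec_color_brackets (expression : String) (out : String) : Prop := out = color_brackets_alt expression
instance (expression : String) (out : String) : Decidable (Spec_color_brackets expression out) := by unfold Spec_color_brackets; infer_instance

-- ===== CLAIM (what is proved, stated in full; the proofs are below) =====
def Claim_equal_color_brackets : Prop := ∀ (expression : String), Dom_color_brackets expression → Spec_color_brackets expression (color_brackets expression)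

-- ===== LEMMAS AND PROOFS =====

-- seg's invariant: its remainder is no longer than its input, starts with ')' if nonempty,
-- and A's loop run over the input equals A's loop continued from the remainder with seg's
-- text appended to the accumulator (the astack is untouched across a balanced segment).
lemma pvSeg_spec : ∀ (f : Nat) (cs : List Char) (opens : Nat), cs.length ≤ f →
    ((pvSeg f cs opens).2.1.length ≤ cs.length) ∧
    ((pvSeg f cs opens).2.1 = [] ∨ (pvSeg f cs opens).2.1.head? = some ')') ∧
    ∀ (astack : List (List Char)) (acc : List Char),
      pvGoA cs (opens % 7) astack acc
        = pvGoA (pvSeg f cs opens).2.1 ((pvSeg f cs opens).2.2 % 7) astack (acc ++ (pvSeg f cs opens).1) := by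
  intro f
  induction f with
  | zero =>
    intro cs opens h
    have hcs : cs = [] := List.length_eq_zero_iff.mp (Nat.le_zero.mp h)
    subst hcs
    exact ⟨by simp [pvSeg], Or.inl rfl, by intro astack acc; simp [pvSeg]⟩
  | succ f ih =>
    intro cs opens h
    match cs with
    | [] =>
      exact ⟨by simp [pvSeg], Or.inl (by simp [pvSeg]), by intro astack acc; simp [pvSeg]⟩
    | c :: rest =>
      have hrestf : rest.length ≤ f := by simp at h; omega
      by_cases hc : c = '('
      · subst hc
        obtain ⟨hlen1, hshape1, heq1⟩ := ih rest (opens + 1) hrestf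
        have hm : (opens % 7 + 1) % 7 = (opens + 1) % 7 := by omega
        rcases hrem : (pvSeg f rest (opens + 1)).2.1 with _ | ⟨c', rem'⟩
        · -- inner segment ran to the end: this '(' is unmatched
          refine ⟨?_, ?_, ?_⟩
          · simp [pvSeg, hrem]
          · left; simp [pvSeg, hrem]
          · intro astack acc
            simp only [pvGoA, hm, reduceIte]
            rw [heq1, hrem]
            simp [pvSeg, hrem, pvGoA, pvPfx, pvPfxK, List.append_assoc]
        · -- inner segment stopped at this '(' 's matching ')'
          have hc' : c' = ')' := by
            rcases hshape1 with h0 | hh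
            · rw [hrem] at h0; cases h0
            · rw [hrem] at hh; simpa using hh
          subst hc'
          have hrem'l : rem'.length + 1 ≤ rest.length := by
            have := hlen1; rw [hrem] at this; simpa using this
          obtain ⟨hlen2, hshape2, heq2⟩ := ih rem' (pvSeg f rest (opens + 1)).2.2 (by omega)
          refine ⟨?_, ?_, ?_⟩
          · simp only [pvSeg, hrem, reduceIte, List.length_cons]
            omega
          · simp only [pvSeg, hrem, reduceIte]
            exact hshape2
          · intro astack acc
            simp only [pvGoA, hm, reduceIte]
            rw [heq1, hrem]
            simp only [pvGoA, reduceIte]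
            rw [heq2]
            simp only [pvSeg, hrem, reduceIte]
            simp [pvPfx, pvPfxK, List.append_assoc]
      · by_cases hc2 : c = ')'
        · subst hc2
          refine ⟨by simp [pvSeg, hc], by right; simp [pvSeg, hc], ?_⟩
          intro astack acc
          simp [pvSeg, hc, pvGoA]
        · obtain ⟨hlen1, hshape1, heq1⟩ := ih rest opens hrestf
          refine ⟨?_, ?_, ?_⟩
          · simp only [pvSeg, if_neg hc, if_neg hc2]
            simp at hlen1 ⊢
            omega
          · simp only [pvSeg, if_neg hc, if_neg hc2]
            exact hshape1
          · intro astack acc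
            simp only [pvGoA, if_neg hc, if_neg hc2]
            rw [heq1]
            simp only [pvSeg, if_neg hc, if_neg hc2]
            simp [List.append_assoc]

lemma pvTop_spec : ∀ (f : Nat) (cs : List Char) (opens : Nat), cs.length < f →
    ∀ (acc : List Char), pvGoA cs (opens % 7) [] acc = acc ++ pvTop f cs opens := by
  intro f
  induction f with
  | zero => intro cs opens h; omega
  | succ f ih =>
    intro cs opens h acc
    obtain ⟨hlen, hshape, heq⟩ := pvSeg_spec cs.length cs opens le_rfl
    rcases hrem : (pvSeg cs.length cs opens).2.1 with _ | ⟨c', rem'⟩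
    · rw [heq, hrem]
      simp [pvTop, hrem, pvGoA]
    · have hc' : c' = ')' := by
        rcases hshape with h0 | hh
        · rw [hrem] at h0; cases h0
        · rw [hrem] at hh; simpa using hh
      subst hc'
      have hrem'l : rem'.length + 1 ≤ cs.length := by
        rw [hrem] at hlen; simpa using hlen
      rw [heq, hrem]
      simp only [pvGoA, reduceIte]
      rw [ih rem' (pvSeg cs.length cs opens).2.2 (by omega)]
      simp [pvTop, hrem, List.append_assoc]

-- ===== VERDICT (by name: the statement is the Claim_ definition above) =====
theorem color_brackets_spec : Claim_equal_color_brackets := by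
  intro e _
  show _ = _
  simp only [color_brackets, color_brackets_alt]
  rw [show (0 : Nat) = 0 % 7 from rfl, pvTop_spec (e.toList.length + 1) e.toList 0 (by omega) []]
  rfl
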